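-- pv_equiv track=rewrite | github.com/federicogiannini13/personality_prediction | embedding_tuning/modules/text_preprocessing.py | check_token
-- ===== SOURCE A (Python) =====
-- def check_token(t):
--     digits = ["0", "1", "2", "3", "4", "5", "6", "7", "8", "9"]
--     for d in digits:
--         if d in t:
--             return False
--     if len(t) < 3:
--         return False
--     return True
-- ===== SOURCE B (Python) =====
-- def check_token(t):
--     if any(c in "0123456789" for c in t):
--         return False
--     return len(t) >= 3
-- ===== Notes on version B (the rewrite author's own statement) =====
-- stated objective: idiomatic
-- what changed: Single pass over the token's characters testing each against the digit set, instead of ten substring scans of the token (one per digit), with the length test folded into a direct comparison.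
import Mathlib
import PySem

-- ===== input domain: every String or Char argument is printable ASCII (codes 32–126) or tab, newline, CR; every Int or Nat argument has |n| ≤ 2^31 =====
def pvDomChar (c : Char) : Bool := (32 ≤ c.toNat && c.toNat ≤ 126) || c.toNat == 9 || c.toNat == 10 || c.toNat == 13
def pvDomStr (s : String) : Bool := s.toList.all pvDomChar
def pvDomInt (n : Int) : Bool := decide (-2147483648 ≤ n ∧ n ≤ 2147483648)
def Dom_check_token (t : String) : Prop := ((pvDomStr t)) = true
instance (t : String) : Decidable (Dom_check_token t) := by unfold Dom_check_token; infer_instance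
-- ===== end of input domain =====

-- ===== PORT A =====
-- B scans the token once, testing each character against the digit set, instead of A's ten substring scans.
def check_token (t : String) : Bool :=
  let digits := ["0", "1", "2", "3", "4", "5", "6", "7", "8", "9"]
  if digits.any (fun d => PySem.Str.isIn d t) then false
  else if PySem.Str.len t < 3 then false
  else true

-- ===== PORT B =====
def check_token_alt (t : String) : Bool :=
  if t.toList.any (fun c => PySem.Chars.isIn [c] "0123456789".toList) then false
  else decide (3 ≤ PySem.Str.len t)

-- ===== PRECONDITION & SPEC =====
def Spec_check_token (t : String) (out : Bool) : Prop := out = check_token_alt t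
instance (t : String) (out : Bool) : Decidable (Spec_check_token t out) := by unfold Spec_check_token; infer_instance

-- ===== CLAIM (what is proved, stated in full; the proofs are below) =====
def Claim_equal_check_token : Prop := ∀ (t : String), Dom_check_token t → Spec_check_token t (check_token t)

-- ===== LEMMAS AND PROOFS =====

-- ===== VERDICT (by name: the statement is the Claim_ definition above) =====
theorem digit_scan_eq (t : String) :
    (["0", "1", "2", "3", "4", "5", "6", "7", "8", "9"].any (fun d => PySem.Str.isIn d t))
      = t.toList.any (fun c => PySem.Chars.isIn [c] "0123456789".toList) := by
  have hsing : ∀ (c : Char) (l : List Char), [c] <:+: l ↔ c ∈ l := by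
    intro c l
    constructor
    · intro hi; exact (List.singleton_sublist).mp hi.sublist
    · intro hm
      obtain ⟨s, t, rfl⟩ := List.append_of_mem hm
      exact ⟨s, t, by simp⟩
  have h : ∀ (c : Char) (l : List Char), PySem.Chars.isIn [c] l = decide (c ∈ l) := by
    intro c l
    by_cases hc : c ∈ l
    · simp [PySem.Chars.isIn_iff_infix, hsing, hc]
    · simp [PySem.Chars.isIn_eq_false_iff, hsing, hc]
  have hs : ∀ (d : String) (t : String), d.toList.length = 1 →
      PySem.Str.isIn d t = PySem.Chars.isIn d.toList t.toList := by
    intro d t _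
    by_cases hi : d.toList <:+: t.toList
    · rw [(PySem.Str.isIn_iff_infix _ _).mpr hi, (PySem.Chars.isIn_iff_infix _ _).mpr hi]
    · rw [show PySem.Str.isIn d t = false by
            rw [← Bool.not_eq_true, PySem.Str.isIn_iff_infix]; exact hi,
         (PySem.Chars.isIn_eq_false_iff _ _).mpr hi]
  rw [Bool.eq_iff_iff]
  simp only [List.any_eq_true, List.mem_cons, List.not_mem_nil, or_false]
  constructor
  · rintro ⟨d, hd, hdt⟩
    rcases hd with rfl|rfl|rfl|rfl|rfl|rfl|rfl|rfl|rfl|rfl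
    · rw [hs _ t (by decide), show ("0").toList = ['0'] from (by decide), h] at hdt
      exact ⟨'0', by simpa using hdt, by rw [h]; decide⟩
    · rw [hs _ t (by decide), show ("1").toList = ['1'] from (by decide), h] at hdt
      exact ⟨'1', by simpa using hdt, by rw [h]; decide⟩
    · rw [hs _ t (by decide), show ("2").toList = ['2'] from (by decide), h] at hdt
      exact ⟨'2', by simpa using hdt, by rw [h]; decide⟩
    · rw [hs _ t (by decide), show ("3").toList = ['3'] from (by decide), h] at hdt
      exact ⟨'3', by simpa using hdt, by rw [h]; decide⟩
    · rw [hs _ t (by decide), show ("4").toList = ['4'] from (by decide), h] at hdt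
      exact ⟨'4', by simpa using hdt, by rw [h]; decide⟩
    · rw [hs _ t (by decide), show ("5").toList = ['5'] from (by decide), h] at hdt
      exact ⟨'5', by simpa using hdt, by rw [h]; decide⟩
    · rw [hs _ t (by decide), show ("6").toList = ['6'] from (by decide), h] at hdt
      exact ⟨'6', by simpa using hdt, by rw [h]; decide⟩
    · rw [hs _ t (by decide), show ("7").toList = ['7'] from (by decide), h] at hdt
      exact ⟨'7', by simpa using hdt, by rw [h]; decide⟩
    · rw [hs _ t (by decide), show ("8").toList = ['8'] from (by decide), h] at hdt
      exact ⟨'8', by simpa using hdt, by rw [h]; decide⟩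
    · rw [hs _ t (by decide), show ("9").toList = ['9'] from (by decide), h] at hdt
      exact ⟨'9', by simpa using hdt, by rw [h]; decide⟩
  · rintro ⟨c, hct, hcd⟩
    rw [h c, show ("0123456789").toList = ['0','1','2','3','4','5','6','7','8','9'] from (by decide)] at hcd
    simp only [decide_eq_true_eq, List.mem_cons, List.not_mem_nil, or_false] at hcd
    have key : ∀ d : String, d.toList = [c] → PySem.Str.isIn d t = true := by
      intro d hdl
      rw [hs d t (by rw [hdl]; rfl), hdl, h c]
      simpa using hct
    rcases hcd with rfl|rfl|rfl|rfl|rfl|rfl|rfl|rfl|rfl|rfl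
    · exact ⟨"0", by exact Or.inl rfl, key _ (by decide)⟩
    · exact ⟨"1", by exact Or.inr (Or.inl rfl), key _ (by decide)⟩
    · exact ⟨"2", by exact Or.inr (Or.inr (Or.inl rfl)), key _ (by decide)⟩
    · exact ⟨"3", by exact Or.inr (Or.inr (Or.inr (Or.inl rfl))), key _ (by decide)⟩
    · exact ⟨"4", by exact Or.inr (Or.inr (Or.inr (Or.inr (Or.inl rfl)))), key _ (by decide)⟩
    · exact ⟨"5", by exact Or.inr (Or.inr (Or.inr (Or.inr (Or.inr (Or.inl rfl))))), key _ (by decide)⟩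
    · exact ⟨"6", by exact Or.inr (Or.inr (Or.inr (Or.inr (Or.inr (Or.inr (Or.inl rfl)))))), key _ (by decide)⟩
    · exact ⟨"7", by exact Or.inr (Or.inr (Or.inr (Or.inr (Or.inr (Or.inr (Or.inr (Or.inl rfl))))))), key _ (by decide)⟩
    · exact ⟨"8", by exact Or.inr (Or.inr (Or.inr (Or.inr (Or.inr (Or.inr (Or.inr (Or.inr (Or.inl rfl)))))))), key _ (by decide)⟩
    · exact ⟨"9", by exact Or.inr (Or.inr (Or.inr (Or.inr (Or.inr (Or.inr (Or.inr (Or.inr (Or.inr (rfl))))))))), key _ (by decide)⟩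

theorem check_token_spec : Claim_equal_check_token := by
  intro t _
  unfold Spec_check_token
  simp only [check_token, check_token_alt, digit_scan_eq]
  cases hb : t.toList.any (fun c => PySem.Chars.isIn [c] "0123456789".toList) with
  | true => simp only [if_true]
  | false =>
    simp only [Bool.false_eq_true, if_false]
    by_cases hl : PySem.Str.len t < 3
    · simp only [hl, if_true]
      symm; simp only [decide_eq_false_iff_not]; omega
    · simp only [hl, if_false]
      symm; simp only [decide_eq_true_eq]; omega
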